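-- pv_equiv track=rewrite | github.com/phanuwit-suriya/aoc-2018 | src/day02.py | part_one
-- ===== SOURCE A (Python) =====
-- def counter(id):
--     return {char: id.count(char) for char in 'abcdefghijklmnopqrstuvwxyz'}
--
-- def part_one(data):
--     two = 0
--     three = 0
--     for id in data:
--         id = counter(id)
--         # id = dict(Counter(id))
--         if {k: v for k, v in id.items() if v == 2}:
--             two += 1
--         if {k: v for k, v in id.items() if v == 3}:
--             three += 1
--     return two * three
-- ===== SOURCE B (Python) =====
-- def part_one(data):
--     two = 0
--     three = 0
--     for s in data:
--         letters = sorted(c for c in s if 'a' <= c <= 'z')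
--         runs = set()
--         i = 0
--         n = len(letters)
--         while i < n:
--             j = i
--             while j < n and letters[j] == letters[i]:
--                 j += 1
--             runs.add(j - i)
--             i = j
--         if 2 in runs:
--             two += 1
--         if 3 in runs:
--             three += 1
--     return two * three
-- ===== Notes on version B (the rewrite author's own statement) =====
-- stated objective: faster
-- what changed: A builds a 26-key count map per id via one full str.count scan per alphabet letter and tests it for a value 2/3; B instead sorts each id's lowercase letters once and does a run-length scan over the sorted sequence, collecting maximal run lengths into a set and testing 2 and 3 for membership.
import Mathlib
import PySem

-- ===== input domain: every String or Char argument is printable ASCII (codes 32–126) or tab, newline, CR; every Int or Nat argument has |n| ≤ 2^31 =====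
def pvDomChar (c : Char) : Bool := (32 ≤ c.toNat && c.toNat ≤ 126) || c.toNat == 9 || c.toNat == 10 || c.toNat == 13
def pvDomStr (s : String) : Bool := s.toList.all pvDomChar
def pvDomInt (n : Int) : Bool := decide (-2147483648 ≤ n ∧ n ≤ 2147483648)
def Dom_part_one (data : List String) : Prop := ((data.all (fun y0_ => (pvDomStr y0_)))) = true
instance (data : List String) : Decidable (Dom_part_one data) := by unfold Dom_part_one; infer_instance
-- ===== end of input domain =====

-- B replaces A's per-id 26-key count map (one str.count scan per alphabet letter) with a
-- sort-then-run-length scan over the id's lowercase letters (objective: faster by a constant factor, as measured; same results).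

-- ===== PORT A =====
-- {char: id.count(char) for char in 'abcdefghijklmnopqrstuvwxyz'}
def counter (id : String) : PySem.Dict Char Int :=
  "abcdefghijklmnopqrstuvwxyz".toList.foldl
    (fun d char => d.insert char ((PySem.Str.count id (String.ofList [char]) : Int)))
    PySem.Dict.empty

def part_one (data : List String) : Int :=
  let r := data.foldl (fun (acc : Int × Int) id =>
    let d := counter id
    let two := if ((d.items.filter (fun kv => kv.2 == (2 : Int))).isEmpty) then acc.1 else acc.1 + 1
    let three := if ((d.items.filter (fun kv => kv.2 == (3 : Int))).isEmpty) then acc.2 else acc.2 + 1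
    (two, three)) (0, 0)
  r.1 * r.2

-- ===== PORT B =====
-- the inner while loops of Source B: scan the (sorted) list run by run; each step emits the
-- length j - i of the maximal run of the head character and continues after it
def runLengths : List Char → List Int
  | [] => []
  | c :: t =>
    (((t.takeWhile (fun x => x == c)).length : Int) + 1) :: runLengths (t.dropWhile (fun x => x == c))
termination_by l => l.length
decreasing_by
  simp only [List.length_cons]
  exact Nat.lt_succ_of_le (List.length_dropWhile_le (fun x => x == c) t)

def part_one_alt (data : List String) : Int :=
  let r := data.foldl (fun (acc : Int × Int) s =>
    let letters := PySem.List.sorted (s.toList.filter (fun c => decide ('a' ≤ c ∧ c ≤ 'z'))) (fun x => x) false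
    let runs : PySem.Set Int := PySem.Set.ofList (runLengths letters)
    let two := if (2 : Int) ∈ runs then acc.1 + 1 else acc.1
    let three := if (3 : Int) ∈ runs then acc.2 + 1 else acc.2
    (two, three)) (0, 0)
  r.1 * r.2

-- ===== PRECONDITION & SPEC =====
def Spec_part_one (data : List String) (out : Int) : Prop := out = part_one_alt data
instance (data : List String) (out : Int) : Decidable (Spec_part_one data out) := by unfold Spec_part_one; infer_instance

-- ===== CLAIM (what is proved, stated in full; the proofs are below) =====
def Claim_equal_part_one : Prop := ∀ (data : List String), Dom_part_one data → Spec_part_one data (part_one data)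

-- ===== LEMMAS AND PROOFS =====

def alphaLit : List Char :=
  ['a','b','c','d','e','f','g','h','i','j','k','l','m','n','o','p','q','r','s','t','u','v','w','x','y','z']

theorem alpha_toList : "abcdefghijklmnopqrstuvwxyz".toList = alphaLit := by decide

theorem chars_count_go_single (c : Char) : ∀ (l : List Char) (fuel acc : Nat), l.length ≤ fuel →
    PySem.Chars.count.go [c] fuel l acc = acc + l.count c := by
  intro l
  induction l with
  | nil => intro fuel acc _; cases fuel <;> simp [PySem.Chars.count.go]
  | cons h t ih =>
    intro fuel acc hf
    cases fuel with
    | zero => simp at hf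
    | succ f =>
      simp only [PySem.Chars.count.go, List.isPrefixOf, List.count_cons]
      by_cases hc : c = h
      · subst hc
        simp [ih f (acc+1) (by simpa using hf)]
        omega
      · simp [BEq.symm_false, hc, ih f acc (by simpa using hf)]

theorem chars_count_single (s : List Char) (c : Char) :
    PySem.Chars.count s [c] = s.count c := by
  simp [PySem.Chars.count, chars_count_go_single c s s.length 0 le_rfl]

theorem mem_alpha (c : Char) : c ∈ alphaLit ↔ ('a' ≤ c ∧ c ≤ 'z') := by
  constructor
  · intro h; fin_cases h <;> exact ⟨by decide, by decide⟩
  · rintro ⟨h1, h2⟩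
    have hb1 : 97 ≤ c.toNat := by simpa [Char.le_def, UInt32.le_iff_toNat_le] using h1
    have hb2 : c.toNat ≤ 122 := by simpa [Char.le_def, UInt32.le_iff_toNat_le] using h2
    have hofn : Char.ofNat c.toNat = c := Char.ofNat_toNat c
    interval_cases h : c.toNat <;> (rw [← hofn]; decide)

-- A's per-id dict lists every letter of the alphabet with its count in the id.
theorem counter_items (s : String) :
    (counter s).items = alphaLit.map (fun c => (c, (s.toList.count c : Int))) := by
  unfold counter
  rw [alpha_toList]
  rw [PySem.Dict.items_foldl_insert_fresh alphaLit (fun c => c)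
        (fun char => ((PySem.Str.count s (String.ofList [char]) : Int)))
        PySem.Dict.empty
        (by intro a _; simp [PySem.Dict.contains_empty]) (by decide)]
  simp [PySem.Str.count_eq, chars_count_single, PySem.Dict.empty]

-- A's branch test, read as an existential over the alphabet.
theorem a_nonempty_iff (s : String) (n : Int) :
    (¬ (((counter s).items.filter (fun kv => kv.2 == n)).isEmpty = true))
      ↔ ∃ c ∈ alphaLit, (s.toList.count c : Int) = n := by
  rw [Bool.not_eq_true, List.isEmpty_eq_false_iff_exists_mem, counter_items]
  constructor
  · rintro ⟨kv, hmem⟩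
    simp only [List.mem_filter, List.mem_map, beq_iff_eq] at hmem
    obtain ⟨⟨c, hca, rfl⟩, hp⟩ := hmem
    exact ⟨c, hca, hp⟩
  · rintro ⟨c, hca, hc⟩
    exact ⟨(c, n), List.mem_filter.mpr ⟨List.mem_map.mpr ⟨c, hca, by rw [hc]⟩, by simp⟩⟩

-- in a sorted list the head's maximal run captures all its occurrences
theorem count_head_dropWhile (c : Char) (t : List Char) (hs : (c :: t).Pairwise (· ≤ ·)) :
    (t.dropWhile (fun x => x == c)).count c = 0 := by
  rw [List.count_eq_zero]
  intro hmem
  cases hd : t.dropWhile (fun x => x == c) with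
  | nil => rw [hd] at hmem; exact absurd hmem (List.not_mem_nil)
  | cons d r =>
    have hne : t.dropWhile (fun x => x == c) ≠ [] := by rw [hd]; exact List.cons_ne_nil d r
    have hdp := List.head_dropWhile_not (p := fun x => x == c) (l := t) hne
    have hdd : (t.dropWhile (fun x => x == c)).head hne = d := by simp [hd]
    rw [hdd] at hdp
    have hdc : d ≠ c := by simpa using hdp
    have hct : ∀ y ∈ t, c ≤ y := (List.pairwise_cons.mp hs).1
    have hdt : d ∈ t := (List.dropWhile_sublist (l := t) (p := fun x => x == c)).mem (by rw [hd]; exact List.mem_cons_self)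
    have hcd : c < d := lt_of_le_of_ne (hct d hdt) (Ne.symm hdc)
    have hpd : (d :: r).Pairwise (· ≤ ·) := by
      rw [← hd]
      exact List.Pairwise.sublist (List.dropWhile_sublist (fun x => x == c))
        ((List.pairwise_cons.mp hs).2)
    rw [hd] at hmem
    rcases List.mem_cons.mp hmem with h | h
    · exact hdc (h.symm) |>.elim
    · have : d ≤ c := (List.pairwise_cons.mp hpd).1 c h
      exact absurd this (not_le.mpr hcd)

theorem takeWhile_head_replicate (c : Char) (t : List Char) :
    t.takeWhile (fun x => x == c) = List.replicate (t.takeWhile (fun x => x == c)).length c := by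
  rw [List.eq_replicate_iff]
  exact ⟨rfl, fun b hb => by simpa using List.mem_takeWhile_imp hb⟩

-- membership in the run lengths of a SORTED list = some character occurring that many times
theorem mem_runLengths_sorted (n : Int) (hn : n ≠ 0) :
    ∀ l : List Char, l.Pairwise (· ≤ ·) →
      (n ∈ runLengths l ↔ ∃ c, ((l.count c : Nat) : Int) = n) := by
  intro l
  induction l using runLengths.induct with
  | case1 =>
    intro _
    simp only [runLengths, List.not_mem_nil, false_iff, not_exists]
    intro c hc
    simp only [List.count_nil, Nat.cast_zero] at hc
    exact hn hc.symm
  | case2 c t ih =>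
    intro hs
    have hdrop : (t.dropWhile (fun x => x == c)).Pairwise (· ≤ ·) :=
      List.Pairwise.sublist (List.dropWhile_sublist (fun x => x == c))
        ((List.pairwise_cons.mp hs).2)
    have ihd := ih hdrop
    have hsplit : t = t.takeWhile (fun x => x == c) ++ t.dropWhile (fun x => x == c) :=
      (List.takeWhile_append_dropWhile).symm
    have hc0 : (t.dropWhile (fun x => x == c)).count c = 0 := count_head_dropWhile c t hs
    have hcount_c : (c :: t).count c = (t.takeWhile (fun x => x == c)).length + 1 := by
      rw [List.count_cons_self]
      conv_lhs => rw [hsplit]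
      rw [List.count_append, hc0, takeWhile_head_replicate c t, List.count_replicate_self,
        List.length_replicate]
    have hcount_ne : ∀ c', c' ≠ c → (c :: t).count c' = (t.dropWhile (fun x => x == c)).count c' := by
      intro c' hne
      have h1 : List.count c' (c :: t) = List.count c' t := by
        simp [Ne.symm hne]
      rw [h1]
      conv_lhs => rw [hsplit]
      rw [List.count_append, takeWhile_head_replicate c t, List.count_replicate]
      simp [Ne.symm hne]
    simp only [runLengths, List.mem_cons]
    constructor
    · rintro (h | h)
      · exact ⟨c, by rw [hcount_c]; push_cast; omega⟩
      · obtain ⟨c', hc'⟩ := ihd.mp h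
        have hne : c' ≠ c := by
          intro he; subst he
          rw [hc0] at hc'
          exact hn (by simpa using hc'.symm)
        exact ⟨c', by rw [hcount_ne c' hne]; exact hc'⟩
    · rintro ⟨c', hc'⟩
      by_cases he : c' = c
      · subst he
        left
        rw [hcount_c] at hc'
        push_cast at hc' ⊢
        omega
      · right
        exact ihd.mpr ⟨c', by rw [← hcount_ne c' he]; exact hc'⟩

-- bridge: a count over the whole id among alphabet letters = a count over the lowercase filter
theorem exists_alpha_iff_filter (s : String) (n : Int) (hn : n ≠ 0) :
    (∃ c ∈ alphaLit, (s.toList.count c : Int) = n)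
      ↔ ∃ c, (((s.toList.filter (fun c => decide ('a' ≤ c ∧ c ≤ 'z'))).count c : Nat) : Int) = n := by
  constructor
  · rintro ⟨c, hca, hc⟩
    have hlow := (mem_alpha c).mp hca
    refine ⟨c, ?_⟩
    rw [List.count_filter (by simp [hlow])]
    exact hc
  · rintro ⟨c, hc⟩
    have hpos : (s.toList.filter (fun c => decide ('a' ≤ c ∧ c ≤ 'z'))).count c ≠ 0 := by
      intro h0; rw [h0] at hc; exact hn (by simpa using hc.symm)
    have hcf : c ∈ s.toList.filter (fun c => decide ('a' ≤ c ∧ c ≤ 'z')) :=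
      List.count_pos_iff.mp (Nat.pos_of_ne_zero hpos)
    have hlow : 'a' ≤ c ∧ c ≤ 'z' := by simpa using (List.mem_filter.mp hcf).2
    refine ⟨c, (mem_alpha c).mpr hlow, ?_⟩
    rw [← List.count_filter (p := fun c => decide ('a' ≤ c ∧ c ≤ 'z')) (by simp [hlow])]
    exact hc

-- the per-id bridge between A's branch test and B's run-length set
theorem per_id (s : String) (n : Int) (hn : n ≠ 0) :
    (¬ (((counter s).items.filter (fun kv => kv.2 == n)).isEmpty = true))
      ↔ n ∈ (PySem.Set.ofList (runLengths
          (PySem.List.sorted (s.toList.filter (fun c => decide ('a' ≤ c ∧ c ≤ 'z'))) (fun x => x) false))) := by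
  set l := s.toList.filter (fun c => decide ('a' ≤ c ∧ c ≤ 'z')) with hl
  have hperm : (PySem.List.sorted l (fun x => x) false).Perm l := PySem.List.sorted_perm l _ _
  have hpw : (PySem.List.sorted l (fun x => x) false).Pairwise (· ≤ ·) := by
    simpa using PySem.List.sorted_pairwise (xs := l) (key := fun x => x)
  rw [PySem.Set.mem_ofList, a_nonempty_iff,
    mem_runLengths_sorted n hn (PySem.List.sorted l (fun x => x) false) hpw]
  rw [exists_alpha_iff_filter s n hn]
  constructor
  · rintro ⟨c, hc⟩; exact ⟨c, by rw [hperm.count_eq]; exact hc⟩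
  · rintro ⟨c, hc⟩; exact ⟨c, by rw [← hperm.count_eq]; exact hc⟩

theorem branch_eq (s : String) (n : Int) (x : Int) (hn : n ≠ 0) :
    (if (((counter s).items.filter (fun kv => kv.2 == n)).isEmpty) then x else x + 1)
    = (if n ∈ (PySem.Set.ofList (runLengths
          (PySem.List.sorted (s.toList.filter (fun c => decide ('a' ≤ c ∧ c ≤ 'z'))) (fun x => x) false)))
       then x + 1 else x) := by
  have h := per_id s n hn
  by_cases m : n ∈ (PySem.Set.ofList (runLengths
      (PySem.List.sorted (s.toList.filter (fun c => decide ('a' ≤ c ∧ c ≤ 'z'))) (fun x => x) false)))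
  · rw [if_pos m, if_neg (by simpa using h.mpr m)]
  · have b : (((counter s).items.filter (fun kv => kv.2 == n)).isEmpty) = true := by
      by_contra hb
      exact m (h.mp hb)
    rw [b, if_neg m]
    simp

theorem folds_eq (data : List String) (acc : Int × Int) :
    data.foldl (fun (acc : Int × Int) id =>
      let d := counter id
      let two := if ((d.items.filter (fun kv => kv.2 == (2 : Int))).isEmpty) then acc.1 else acc.1 + 1
      let three := if ((d.items.filter (fun kv => kv.2 == (3 : Int))).isEmpty) then acc.2 else acc.2 + 1
      (two, three)) acc
    = data.foldl (fun (acc : Int × Int) s =>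
      let letters := PySem.List.sorted (s.toList.filter (fun c => decide ('a' ≤ c ∧ c ≤ 'z'))) (fun x => x) false
      let runs : PySem.Set Int := PySem.Set.ofList (runLengths letters)
      let two := if (2 : Int) ∈ runs then acc.1 + 1 else acc.1
      let three := if (3 : Int) ∈ runs then acc.2 + 1 else acc.2
      (two, three)) acc := by
  refine List.foldl_ext _ _ acc (fun b s _ => ?_)
  simp only
  rw [branch_eq s 2 b.1 (by decide), branch_eq s 3 b.2 (by decide)]

-- ===== VERDICT (by name: the statement is the Claim_ definition above) =====
theorem part_one_spec : Claim_equal_part_one := by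
  intro data _
  unfold Spec_part_one part_one part_one_alt
  rw [folds_eq]
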